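-- pv_equiv track=rewrite | github.com/darkreactions/DRP | DRP/ml_models/feature_visitors/weka/abstractWekaFeatureVisitor.py | _readWekaOutput
-- ===== SOURCE A (Python) =====
-- def _readWekaOutput(output):
--     """Read a weka feature selection output and outputs a list of descriptors."""
--     start_line = "Selected attributes:"
--     raw_lines = output.split('\n')
--
--     found = False
--     descriptors = []
--     for line in raw_lines:
--         if found:
--             desc = line.strip()
--             if desc:  # check if line is just whitespace
--                 descriptors.append(desc)
--         if line.startswith(start_line):
--             found = True
--
--     return descriptors
-- ===== SOURCE B (Python) =====
-- def _readWekaOutput(output):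
--     """Read a weka feature selection output and outputs a list of descriptors."""
--     lines = output.split('\n')
--     idx = next((i for i, line in enumerate(lines)
--                 if line.startswith("Selected attributes:")), None)
--     if idx is None:
--         return []
--     return [desc for desc in (line.strip() for line in lines[idx + 1:]) if desc]
-- ===== Notes on version B (the rewrite author's own statement) =====
-- stated objective: simpler
-- what changed: Replaces the single stateful pass carrying a boolean flag by a locate-then-extract decomposition: find the index of the first marker line, then a comprehension over the tail slice keeping stripped non-empty lines.
import Mathlib
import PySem

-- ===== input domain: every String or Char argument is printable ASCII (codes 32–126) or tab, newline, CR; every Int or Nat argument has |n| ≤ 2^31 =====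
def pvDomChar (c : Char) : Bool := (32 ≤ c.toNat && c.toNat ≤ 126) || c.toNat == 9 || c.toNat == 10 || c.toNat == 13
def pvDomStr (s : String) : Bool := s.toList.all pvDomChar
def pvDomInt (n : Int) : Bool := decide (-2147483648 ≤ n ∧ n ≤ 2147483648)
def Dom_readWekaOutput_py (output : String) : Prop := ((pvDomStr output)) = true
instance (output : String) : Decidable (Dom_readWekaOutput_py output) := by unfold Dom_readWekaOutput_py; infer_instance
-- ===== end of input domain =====

-- B strips lines and skips empty ones after locating the marker; A does the same with a
-- running boolean flag. Header: B is a locate-then-extract decomposition of the same task.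

-- ===== PORT A =====
-- one loop step of A: if the flag is set, append the stripped non-empty line; then test the marker
def wekaStepA (st : Bool × List String) (line : String) : Bool × List String :=
  let st1 :=
    if st.1 then
      let desc := PySem.Str.strip line
      if desc ≠ "" then (st.1, st.2 ++ [desc]) else st
    else st
  if PySem.Str.startswith line "Selected attributes:" then (true, st1.2) else st1

def readWekaOutput_py (output : String) : List String :=
  let rawLines := (PySem.Str.split? output "\n").getD []
  (rawLines.foldl wekaStepA (false, [])).2

-- ===== PORT B =====
def readWekaOutput_py_alt (output : String) : List String :=
  let lines := (PySem.Str.split? output "\n").getD []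
  match lines.findIdx? (fun l => PySem.Str.startswith l "Selected attributes:") with
  | none => []
  | some i => ((lines.drop (i + 1)).map PySem.Str.strip).filter (fun d => d ≠ "")

-- ===== PRECONDITION & SPEC =====
def Spec_readWekaOutput_py (output : String) (out : List String) : Prop := out = readWekaOutput_py_alt output
instance (output : String) (out : List String) : Decidable (Spec_readWekaOutput_py output out) := by unfold Spec_readWekaOutput_py; infer_instance

-- ===== CLAIM (what is proved, stated in full; the proofs are below) =====
def Claim_equal_readWekaOutput_py : Prop := ∀ (output : String), Dom_readWekaOutput_py output → Spec_readWekaOutput_py output (readWekaOutput_py output)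

-- ===== LEMMAS AND PROOFS =====

-- once A's flag is true, the rest of the fold just collects stripped non-empty lines
theorem wekaFold_true (lines : List String) (acc : List String) :
    (lines.foldl wekaStepA (true, acc)).2
      = acc ++ (lines.map PySem.Str.strip).filter (fun d => d ≠ "") := by
  induction lines generalizing acc with
  | nil => simp
  | cons l ls ih =>
    simp only [List.foldl_cons, wekaStepA]
    by_cases hs : PySem.Str.strip l ≠ ""
    · simp [hs, ih]
    · simp at hs
      simp [hs, ih]

-- with the flag false, A's fold computes B's locate-then-extract value
theorem wekaFold_false (lines : List String) (acc : List String) :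
    (lines.foldl wekaStepA (false, acc)).2
      = acc ++ (match lines.findIdx? (fun l => PySem.Str.startswith l "Selected attributes:") with
        | none => []
        | some i => ((lines.drop (i + 1)).map PySem.Str.strip).filter (fun d => d ≠ "")) := by
  induction lines generalizing acc with
  | nil => simp
  | cons l ls ih =>
    simp only [List.foldl_cons, List.findIdx?_cons]
    by_cases hp : PySem.Str.startswith l "Selected attributes:" = true
    · simp only [wekaStepA, hp, if_true, if_false, Bool.false_eq_true]
      simp [wekaFold_true]
    · simp only [wekaStepA, hp, if_false, Bool.false_eq_true]
      rw [ih]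
      cases h : ls.findIdx? (fun l => PySem.Str.startswith l "Selected attributes:") with
      | none => simp
      | some i => simp [List.drop_succ_cons]

-- ===== VERDICT (by name: the statement is the Claim_ definition above) =====
theorem readWekaOutput_py_spec : Claim_equal_readWekaOutput_py := by
  intro output _
  unfold Spec_readWekaOutput_py readWekaOutput_py readWekaOutput_py_alt
  rw [wekaFold_false]
  simp
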